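-- pv_equiv track=rewrite | github.com/sagol-python-for-neuroscientists/textbook-public | assignment1/hw1_question1.py | _trifeca_logic
-- ===== SOURCE A (Python) =====
-- def _trifeca_logic(firsts, seconds):
--     """
--     Iterate over pairs of letters, counting the number
--     of consecutrive pairs.
--     firsts and seconds are strings.
--     """
--     num_pairs = 0
--     for first, second in zip(firsts, seconds):
--         if first == second:
--             num_pairs += 1
--             if num_pairs == 3:
--                 return True
--         else:
--             num_pairs = 0
--     return False
-- ===== SOURCE B (Python) =====
-- def _trifeca_logic(firsts, seconds):
--     # Phase 1: build a match mask ('1' where the characters agree, '0' where not).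
--     mask = ''.join('1' if a == b else '0' for a, b in zip(firsts, seconds))
--     # Phase 2: three consecutive matches = a run '111' somewhere in the mask.
--     return '111' in mask
-- ===== Notes on version B (the rewrite author's own statement) =====
-- stated objective: simpler
-- what changed: Replaces the stateful count-and-reset scan with early return by two separate phases: build a 0/1 match mask, then test whether '111' occurs in it.
import Mathlib
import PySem

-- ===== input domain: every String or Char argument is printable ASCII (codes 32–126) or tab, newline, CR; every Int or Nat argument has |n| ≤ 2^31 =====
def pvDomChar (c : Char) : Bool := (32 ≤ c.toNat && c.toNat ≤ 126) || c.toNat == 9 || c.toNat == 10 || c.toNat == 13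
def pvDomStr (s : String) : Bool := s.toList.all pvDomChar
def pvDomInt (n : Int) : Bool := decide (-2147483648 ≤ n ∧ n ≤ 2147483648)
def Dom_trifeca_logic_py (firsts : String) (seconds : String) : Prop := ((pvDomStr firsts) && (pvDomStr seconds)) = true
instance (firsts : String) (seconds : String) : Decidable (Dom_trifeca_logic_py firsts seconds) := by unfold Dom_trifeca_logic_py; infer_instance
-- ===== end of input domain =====

-- B rewrites A's stateful count-and-reset scan as two phases: build a 0/1 match mask, then search it for the run "111" (objective: simpler).

-- ===== PORT A =====
-- the for-loop over zip with counter state and early return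
def trifecaLoopA : List (Char × Char) → Nat → Bool
  | [], _ => false
  | (f, s) :: rest, num_pairs =>
    if f == s then
      if num_pairs + 1 == 3 then true
      else trifecaLoopA rest (num_pairs + 1)
    else trifecaLoopA rest 0

def trifeca_logic_py (firsts : String) (seconds : String) : Bool :=
  trifecaLoopA (firsts.toList.zip seconds.toList) 0

-- ===== PORT B =====
-- phase 1: the match mask;  phase 2: '111' in mask  (PySem.Chars.isIn = Python's `in`)
def trifecaMask (firsts : String) (seconds : String) : List Char :=
  (firsts.toList.zip seconds.toList).map (fun p => if p.1 == p.2 then '1' else '0')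

def trifeca_logic_py_alt (firsts : String) (seconds : String) : Bool :=
  PySem.Chars.isIn ['1', '1', '1'] (trifecaMask firsts seconds)

-- ===== PRECONDITION & SPEC =====
def Spec_trifeca_logic_py (firsts : String) (seconds : String) (out : Bool) : Prop := out = trifeca_logic_py_alt firsts seconds
instance (firsts : String) (seconds : String) (out : Bool) : Decidable (Spec_trifeca_logic_py firsts seconds out) := by unfold Spec_trifeca_logic_py; infer_instance

-- ===== CLAIM (what is proved, stated in full; the proofs are below) =====
def Claim_equal_trifeca_logic_py : Prop := ∀ (firsts : String) (seconds : String), Dom_trifeca_logic_py firsts seconds → Spec_trifeca_logic_py firsts seconds (trifeca_logic_py firsts seconds)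

-- ===== LEMMAS AND PROOFS =====

-- the mask of a zip list
def maskOf (l : List (Char × Char)) : List Char :=
  l.map (fun p => if p.1 == p.2 then '1' else '0')

-- key invariant: the loop with counter n (n < 3) returns true exactly when "111"
-- occurs in (n ones) ++ mask of the remaining pairs
theorem trifecaLoopA_iff_infix (l : List (Char × Char)) :
    ∀ n, n < 3 →
      (trifecaLoopA l n = true ↔ ['1', '1', '1'] <:+: (List.replicate n '1' ++ maskOf l)) := by
  induction l with
  | nil =>
    intro n hn
    simp only [trifecaLoopA, maskOf, List.map_nil, List.append_nil]
    constructor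
    · intro h; exact absurd h (by simp)
    · intro h
      have := h.length_le
      simp at this
      omega
  | cons p rest ih =>
    intro n hn
    obtain ⟨f, s⟩ := p
    have hmask : maskOf ((f, s) :: rest)
        = (if f == s then '1' else '0') :: maskOf rest := by
      simp [maskOf]
    by_cases hfs : f == s
    · by_cases h3 : n = 2
      · subst h3
        simp only [trifecaLoopA, hfs, hmask, if_true]
        constructor
        · intro _
          exact ⟨[], maskOf rest, by simp [List.replicate]⟩
        · intro _; rfl
      · have hn' : n + 1 < 3 := by omega
        have hstep : trifecaLoopA ((f, s) :: rest) n = trifecaLoopA rest (n + 1) := by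
          have : (n + 1 == 3) = false := by simp only [beq_eq_false_iff_ne, ne_eq]; omega
          simp [trifecaLoopA, hfs, this]
        have hlist : List.replicate n '1' ++ maskOf ((f, s) :: rest)
            = List.replicate (n + 1) '1' ++ maskOf rest := by
          simp [hmask, hfs, List.replicate_succ']
        rw [hstep, hlist]
        exact ih (n + 1) hn'
    · have hstep : trifecaLoopA ((f, s) :: rest) n = trifecaLoopA rest 0 := by
        simp [trifecaLoopA, hfs]
      rw [hstep, hmask, if_neg hfs]
      have h0 := ih 0 (by omega)
      simp only [List.replicate, List.nil_append] at h0
      rw [h0]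
      -- peeling the (at most two) leading ones and the '0' off the infix test
      interval_cases n <;>
        simp [List.replicate, List.infix_cons_iff, List.cons_prefix_cons]

-- ===== VERDICT (by name: the statement is the Claim_ definition above) =====
theorem trifeca_logic_py_spec : Claim_equal_trifeca_logic_py := by
  intro firsts seconds _
  unfold Spec_trifeca_logic_py trifeca_logic_py trifeca_logic_py_alt
  rw [Bool.eq_iff_iff, PySem.Chars.isIn_iff_infix]
  have h := trifecaLoopA_iff_infix (firsts.toList.zip seconds.toList) 0 (by omega)
  simpa [maskOf, trifecaMask] using h
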